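-- pv_equiv track=rewrite | github.com/ghostmkg/programming-language | Python/flexible_undo_increment.py | flexible_undo
-- ===== SOURCE A (Python) =====
-- def flexible_undo(n, q, operations):
--     nums = [0] * n
--     stack = []
--
--     for op in operations:
--         if op[0] == 1:
--             i = op[1]
--             nums[i] += 1
--             stack.append(i)
--         else:
--             k = op[1]
--             undo_count = min(k, len(stack))
--             for _ in range(undo_count):
--                 idx = stack.pop()
--                 nums[idx] -= 1
--
--     return nums
-- ===== SOURCE B (Python) =====
-- def flexible_undo(n, q, operations):
--     # Simpler decomposition: the loop only maintains the undo stack;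
--     # the counts are rebuilt from the surviving stack in one final pass.
--     stack = []
--     for op in operations:
--         if op[0] == 1:
--             stack.append(op[1])
--         else:
--             stack = stack[:max(len(stack) - op[1], 0)]
--     result = [0] * n
--     for i in stack:
--         result[i] += 1
--     return result
-- ===== Notes on version B (the rewrite author's own statement) =====
-- stated objective: simpler
-- what changed: B never touches the counts array during the operation loop: it only maintains the stack (undo = one slice truncation instead of a per-element pop-and-decrement inner loop) and rebuilds the counts from the surviving stack in a single final pass.
import Mathlib
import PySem

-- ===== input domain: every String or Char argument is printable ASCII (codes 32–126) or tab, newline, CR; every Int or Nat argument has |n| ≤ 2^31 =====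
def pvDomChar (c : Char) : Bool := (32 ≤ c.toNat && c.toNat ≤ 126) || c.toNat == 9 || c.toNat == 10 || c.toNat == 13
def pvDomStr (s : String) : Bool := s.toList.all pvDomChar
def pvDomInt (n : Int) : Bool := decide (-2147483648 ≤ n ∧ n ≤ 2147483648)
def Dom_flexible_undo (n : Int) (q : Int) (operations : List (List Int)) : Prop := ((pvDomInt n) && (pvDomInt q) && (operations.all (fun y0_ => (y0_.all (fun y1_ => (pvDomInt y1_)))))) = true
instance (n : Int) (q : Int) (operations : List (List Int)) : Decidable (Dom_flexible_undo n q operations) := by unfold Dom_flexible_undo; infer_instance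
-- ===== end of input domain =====

-- B keeps the counts array out of the operation loop (stack only; undo = one slice
-- truncation) and rebuilds the counts from the surviving stack in a final pass: simpler.

-- ===== PORT A =====
-- nums[idx] -= 1
def pvDecAt (nums : List Int) (idx : Int) : List Int :=
  PySem.List.pySetD nums idx (PySem.List.pyGetD nums idx 0 - 1)

-- 'for _ in range(undo_count): idx = stack.pop(); nums[idx] -= 1'
-- (the 'none' branch is unreachable: undo_count = min(k, len(stack)))
def pvPopLoop : Nat → List Int → List Int → List Int × List Int
  | 0, nums, stack => (nums, stack)
  | c+1, nums, stack =>
    match stack.getLast? with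
    | none => (nums, stack)
    | some idx => pvPopLoop c (pvDecAt nums idx) stack.dropLast

def pvStepA (s : List Int × List Int) (op : List Int) : List Int × List Int :=
  if PySem.List.pyGetD op 0 0 = 1 then
    let i := PySem.List.pyGetD op 1 0
    (PySem.List.pySetD s.1 i (PySem.List.pyGetD s.1 i 0 + 1), s.2 ++ [i])
  else
    let k := PySem.List.pyGetD op 1 0
    pvPopLoop (min k (s.2.length : Int)).toNat s.1 s.2

def flexible_undo (n : Int) (q : Int) (operations : List (List Int)) : List Int :=
  (operations.foldl pvStepA (List.replicate n.toNat 0, [])).1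

-- ===== PORT B =====
def pvStepB (stack : List Int) (op : List Int) : List Int :=
  if PySem.List.pyGetD op 0 0 = 1 then
    stack ++ [PySem.List.pyGetD op 1 0]
  else
    -- stack = stack[:max(len(stack) - op[1], 0)]
    stack.take (max ((stack.length : Int) - PySem.List.pyGetD op 1 0) 0).toNat

-- result[i] += 1
def pvIncAt (res : List Int) (i : Int) : List Int :=
  PySem.List.pySetD res i (PySem.List.pyGetD res i 0 + 1)

def flexible_undo_alt (n : Int) (q : Int) (operations : List (List Int)) : List Int :=
  (operations.foldl pvStepB []).foldl pvIncAt (List.replicate n.toNat 0)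

-- ===== PRECONDITION & SPEC =====
-- Pre_ excludes exactly the inputs on which A raises: an op with fewer than two entries
-- (op[1] IndexError) and a type-1 op whose index is outside range(-n, n) (nums[i] IndexError).
def Pre_flexible_undo (n : Int) (q : Int) (operations : List (List Int)) : Prop :=
  ∀ op ∈ operations, 2 ≤ op.length ∧ (op.getD 0 0 = 1 → -n ≤ op.getD 1 0 ∧ op.getD 1 0 < n)
instance (n : Int) (q : Int) (operations : List (List Int)) : Decidable (Pre_flexible_undo n q operations) := by unfold Pre_flexible_undo; infer_instance

def pvWitness_flexible_undo : Int × Int × List (List Int) :=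
  (2, 4, [[1, 0], [1, 1], [1, -1], [2, 2], [1, 1]])

def Spec_flexible_undo (n : Int) (q : Int) (operations : List (List Int)) (out : List Int) : Prop := out = flexible_undo_alt n q operations
instance (n : Int) (q : Int) (operations : List (List Int)) (out : List Int) : Decidable (Spec_flexible_undo n q operations out) := by unfold Spec_flexible_undo; infer_instance

-- ===== CLAIM (what is proved, stated in full; the proofs are below) =====
def Claim_equal_flexible_undo : Prop := ∀ (n : Int) (q : Int) (operations : List (List Int)), Dom_flexible_undo n q operations → Pre_flexible_undo n q operations → Spec_flexible_undo n q operations (flexible_undo n q operations)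

-- ===== LEMMAS AND PROOFS =====

-- valid Python index into [0]*n
def pvValid (n i : Int) : Prop := -n ≤ i ∧ i < n

-- the nonnegative index i refers to
def pvNorm (n i : Int) : Int := if i < 0 then i + n else i

-- how many surviving stack entries hit cell j
def pvCnt (n : Int) (st : List Int) (j : Int) : Int :=
  (st.countP (fun i => decide (pvNorm n i = j)) : Int)

-- the counts array determined by the stack
def pvCanon (n : Int) (st : List Int) : List Int :=
  (List.range n.toNat).map (fun j : Nat => pvCnt n st (j : Int))

theorem pvCanon_length (n : Int) (st : List Int) : (pvCanon n st).length = n.toNat := by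
  simp [pvCanon]

theorem pvNorm_bounds {n i : Int} (h : pvValid n i) :
    0 ≤ pvNorm n i ∧ pvNorm n i < n := by
  rcases h with ⟨h1, h2⟩; unfold pvNorm; split <;> omega

theorem pvIdx_canon {n i : Int} (h : pvValid n i) :
    PySem.List.pyIdx? n.toNat i = some (pvNorm n i).toNat := by
  rcases h with ⟨h1, h2⟩
  unfold PySem.List.pyIdx? pvNorm
  by_cases hi : 0 ≤ i
  · rw [if_pos hi, if_pos (show i < (n.toNat : Int) by omega), if_neg (show ¬ i < 0 by omega)]
  · rw [if_neg hi, if_pos (show -(n.toNat : Int) ≤ i by omega), if_pos (show i < 0 by omega)]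
    congr 1
    omega

theorem pvCanon_getElem (n : Int) (st : List Int) (m : Nat) (hm : m < n.toNat) :
    (pvCanon n st)[m]'(by simpa only [pvCanon, List.length_map, List.length_range] using hm) =
      pvCnt n st m := by
  unfold pvCanon
  rw [List.getElem_map, List.getElem_range]

theorem pvGet_canon {n i : Int} (st : List Int) (h : pvValid n i) :
    PySem.List.pyGetD (pvCanon n st) i 0 = pvCnt n st (pvNorm n i) := by
  have hb := pvNorm_bounds h
  have hlt : (pvNorm n i).toNat < n.toNat := by omega
  have hlt' : (pvNorm n i).toNat < (pvCanon n st).length := by rw [pvCanon_length]; omega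
  simp only [PySem.List.pyGetD, PySem.List.pyGet?, pvCanon_length, pvIdx_canon h]
  rw [show ((some (pvNorm n i).toNat).bind fun k => (pvCanon n st)[k]?) =
      (pvCanon n st)[(pvNorm n i).toNat]? from rfl]
  rw [List.getElem?_eq_getElem hlt', Option.getD_some, pvCanon_getElem n st _ hlt]
  all_goals (congr 1; omega)

theorem pvSet_canon {n i : Int} (st : List Int) (h : pvValid n i) (v : Int) :
    PySem.List.pySetD (pvCanon n st) i v = (pvCanon n st).set (pvNorm n i).toNat v := by
  simp only [PySem.List.pySetD, PySem.List.pySet?, pvCanon_length, pvIdx_canon h,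
    Option.map_some, Option.getD_some]

theorem pvCnt_append (n : Int) (st : List Int) (i j : Int) :
    pvCnt n (st ++ [i]) j = pvCnt n st j + (if pvNorm n i = j then 1 else 0) := by
  simp [pvCnt, List.countP_append, List.countP_cons]

theorem pvInc_canon {n i : Int} (st : List Int) (h : pvValid n i) :
    pvIncAt (pvCanon n st) i = pvCanon n (st ++ [i]) := by
  have hb := pvNorm_bounds h
  unfold pvIncAt
  rw [pvGet_canon st h, pvSet_canon st h]
  apply List.ext_getElem
  · simp [pvCanon]
  · intro m hm1 hm2
    have hmn : m < n.toNat := by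
      simpa only [pvCanon, List.length_map, List.length_range] using hm2
    rw [List.getElem_set, pvCanon_getElem n (st ++ [i]) m hmn, pvCnt_append]
    by_cases hme : (pvNorm n i).toNat = m
    · rw [if_pos hme, if_pos (by omega)]
      congr 2
      omega
      
    · rw [if_neg hme, if_neg (show ¬ pvNorm n i = (m : Int) by omega),
        pvCanon_getElem n st m hmn]
      ring

theorem pvDec_canon {n i : Int} (st : List Int) (h : pvValid n i) :
    pvDecAt (pvCanon n (st ++ [i])) i = pvCanon n st := by
  have hb := pvNorm_bounds h
  unfold pvDecAt
  rw [pvGet_canon _ h, pvSet_canon _ h]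
  apply List.ext_getElem
  · simp [pvCanon]
  · intro m hm1 hm2
    have hmn : m < n.toNat := by
      simpa only [pvCanon, List.length_map, List.length_range] using hm2
    rw [List.getElem_set, pvCanon_getElem n st m hmn]
    by_cases hme : (pvNorm n i).toNat = m
    · rw [if_pos hme]
      have : pvCnt n (st ++ [i]) (pvNorm n i) = pvCnt n st (pvNorm n i) + 1 := by
        rw [pvCnt_append, if_pos rfl]
      have hcm : pvCnt n st (pvNorm n i) = pvCnt n st (m : Int) := by
        congr 1; omega
      omega
    · rw [if_neg hme, pvCanon_getElem n (st ++ [i]) m hmn, pvCnt_append,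
        if_neg (show ¬ pvNorm n i = (m : Int) by omega)]
      ring

theorem pvPopLoop_canon (n : Int) :
    ∀ (c : Nat) (st : List Int), c ≤ st.length → (∀ i ∈ st, pvValid n i) →
    pvPopLoop c (pvCanon n st) st =
      (pvCanon n (st.take (st.length - c)), st.take (st.length - c)) := by
  intro c
  induction c with
  | zero => intro st _ _; simp [pvPopLoop]
  | succ c ih =>
    intro st hc hv
    cases hlast : st.getLast? with
    | none =>
      have h0 : st = [] := List.getLast?_eq_none_iff.mp hlast
      subst h0; simp at hc
    | some last =>
      obtain ⟨ys, rfl⟩ := List.getLast?_eq_some_iff.mp hlast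
      have hvl : pvValid n last := hv last (by simp)
      have hyv : ∀ i ∈ ys, pvValid n i := fun i hi => hv i (List.mem_append_left _ hi)
      have hlen : (ys ++ [last]).length = ys.length + 1 := by simp
      simp only [pvPopLoop, hlast]
      rw [pvDec_canon ys hvl, show (ys ++ [last]).dropLast = ys by simp]
      have hcy : c ≤ ys.length := by omega
      rw [ih ys hcy hyv]
      have htake : ys.take (ys.length - c) = (ys ++ [last]).take ((ys ++ [last]).length - (c + 1)) := by
        rw [hlen, show ys.length + 1 - (c + 1) = ys.length - c by omega,
          List.take_append_of_le_length (by omega)]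
      rw [htake]

theorem pvStep_sync {n : Int} (op : List Int) (st : List Int)
    (hop : 2 ≤ op.length ∧ (op.getD 0 0 = 1 → pvValid n (op.getD 1 0)))
    (hv : ∀ i ∈ st, pvValid n i) :
    pvStepA (pvCanon n st, st) op = (pvCanon n (pvStepB st op), pvStepB st op) := by
  obtain ⟨hlen, hval⟩ := hop
  have h1 : (1 : Nat) < op.length := by omega
  have hg1 : PySem.List.pyGetD op 1 0 = op.getD 1 0 := by
    simp [PySem.List.pyGetD, PySem.List.pyGet?, PySem.List.pyIdx?, h1, List.getD_eq_getElem?_getD]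
  unfold pvStepA pvStepB
  rw [PySem.List.pyGetD_zero, hg1]
  by_cases hb : op.getD 0 0 = 1
  · simp only [hb, if_pos]
    rw [show PySem.List.pySetD (pvCanon n st) (op.getD 1 0)
          (PySem.List.pyGetD (pvCanon n st) (op.getD 1 0) 0 + 1)
        = pvIncAt (pvCanon n st) (op.getD 1 0) from rfl,
      pvInc_canon st (hval hb)]
  · simp only [hb, if_false]
    set k := op.getD 1 0 with hk
    have hcle : (min k (st.length : Int)).toNat ≤ st.length := by omega
    rw [pvPopLoop_canon n _ st hcle hv]
    by_cases hkpos : 0 < k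
    · have : st.length - (min k (st.length : Int)).toNat
           = (max ((st.length : Int) - k) 0).toNat := by omega
      rw [this]
    · have h0 : (min k (st.length : Int)).toNat = 0 := by omega
      have h2 : st.length ≤ (max ((st.length : Int) - k) 0).toNat := by omega
      rw [h0, List.take_of_length_le h2]
      simp

theorem pvStepB_valid {n : Int} (op : List Int) (st : List Int)
    (hop : op.getD 0 0 = 1 → pvValid n (op.getD 1 0))
    (hv : ∀ i ∈ st, pvValid n i) :
    ∀ i ∈ pvStepB st op, pvValid n i := by
  intro i hi
  unfold pvStepB at hi
  rw [PySem.List.pyGetD_zero] at hi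
  by_cases hb : op.getD 0 0 = 1
  · rw [if_pos hb] at hi
    rcases List.mem_append.mp hi with h | h
    · exact hv i h
    · have h1 : (1 : Int) ≥ 0 := by omega
      simp at h
      subst h
      have : PySem.List.pyGetD op 1 0 = op.getD 1 0 ∨ PySem.List.pyGetD op 1 0 = 0 := by
        simp [PySem.List.pyGetD, PySem.List.pyGet?, PySem.List.pyIdx?, List.getD_eq_getElem?_getD]
        by_cases h2 : (1:Nat) < op.length <;> simp [h2]
      rcases this with h | h
      · rw [h]; exact hop hb
      · rw [h]
        have := hop hb
        -- i = 0 valid needs n > 0; derive from validity of op.getD 1 0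
        rcases this with ⟨a, b⟩
        constructor <;> omega
  · rw [if_neg hb] at hi
    exact hv i (List.mem_of_mem_take hi)

theorem pvLoop_sync {n : Int} (ops : List (List Int))
    (hops : ∀ op ∈ ops, 2 ≤ op.length ∧ (op.getD 0 0 = 1 → pvValid n (op.getD 1 0))) :
    ∀ st, (∀ i ∈ st, pvValid n i) →
    ops.foldl pvStepA (pvCanon n st, st) = (pvCanon n (ops.foldl pvStepB st), ops.foldl pvStepB st) := by
  induction ops with
  | nil => intro st _; simp
  | cons op rest ih =>
    intro st hv
    have hop := hops op (List.mem_cons_self)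
    have hrest : ∀ o ∈ rest, 2 ≤ o.length ∧ (o.getD 0 0 = 1 → pvValid n (o.getD 1 0)) :=
      fun o ho => hops o (List.mem_cons_of_mem _ ho)
    simp only [List.foldl_cons]
    rw [pvStep_sync op st hop hv]
    exact ih hrest (pvStepB st op) (pvStepB_valid op st hop.2 hv)

theorem pvCanon_nil (n : Int) : pvCanon n [] = List.replicate n.toNat 0 := by
  simp [pvCanon, pvCnt]

theorem pvFoldInc_canon (n : Int) :
    ∀ (st acc : List Int), (∀ i ∈ st, pvValid n i) →
    st.foldl pvIncAt (pvCanon n acc) = pvCanon n (acc ++ st) := by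
  intro st
  induction st with
  | nil => intro acc _; simp
  | cons i rest ih =>
    intro acc hv
    simp only [List.foldl_cons]
    rw [pvInc_canon acc (hv i List.mem_cons_self)]
    rw [ih (acc ++ [i]) (fun j hj => hv j (List.mem_cons_of_mem _ hj))]
    simp

theorem pvFoldB_valid {n : Int} :
    ∀ (ops : List (List Int)) (st : List Int),
    (∀ op ∈ ops, 2 ≤ op.length ∧ (op.getD 0 0 = 1 → pvValid n (op.getD 1 0))) →
    (∀ i ∈ st, pvValid n i) → ∀ i ∈ ops.foldl pvStepB st, pvValid n i := by
  intro ops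
  induction ops with
  | nil => intro st _ hv; simpa using hv
  | cons op rest ih =>
    intro st hops hv
    simp only [List.foldl_cons]
    exact ih (pvStepB st op) (fun o ho => hops o (List.mem_cons_of_mem _ ho))
      (pvStepB_valid op st (hops op List.mem_cons_self).2 hv)

-- ===== VERDICT (by name: the statement is the Claim_ definition above) =====
theorem flexible_undo_spec : Claim_equal_flexible_undo := by
  intro n q ops _ hpre
  unfold Spec_flexible_undo flexible_undo flexible_undo_alt
  have hops : ∀ op ∈ ops, 2 ≤ op.length ∧ (op.getD 0 0 = 1 → pvValid n (op.getD 1 0)) := by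
    intro op hop
    obtain ⟨h1, h2⟩ := hpre op hop
    exact ⟨h1, fun hb => h2 hb⟩
  have h := pvLoop_sync ops hops [] (by simp)
  rw [pvCanon_nil] at h
  rw [h, ← pvCanon_nil n,
    pvFoldInc_canon n (ops.foldl pvStepB []) [] (pvFoldB_valid ops [] hops (by simp))]
  simp
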